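-- pv_equiv track=rewrite | github.com/volooptaz/pitonise | 2020-01-liber-ada-early-release/lava.py | xor_fold_rot
-- ===== SOURCE A (Python) =====
-- def shift_left(byte):
--     """Shift the byte left by one, and chop down to 8 bits."""
--     return (byte << 1) & 255
--
-- def leftmost_bit(byte):
--     """The leftmost (128-value) bit of the byte."""
--     return byte & 128
--
-- def xor_fold_once(input, buffer):
--     """xor input with the buffer and rotate the buffer one bit to the left."""
--     ### /* xor the next SHA-1 digest chunk */
--     output = [a ^ b for a, b in zip(input, buffer)]
--
--     ### /* circular shift left by 1 bit */
--     # whole buffer, not just individual bytes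
--     shifted = [shift_left(output[i]) | leftmost_bit(output[i-1]) for i in range(len(output))]
--     return shifted
--
-- def xor_fold_rot(buffers):
--     """ Fold each buffer into the next with a xor-rotate-and-fold (not my terminology)."""
--     output = []
--
--     # start with a buffer of null-bytes, then xor-fold it with
--     # the last buffer to initialize
--     stored_buffer = (chr(0) * 20).encode('utf-8')
--     stored_buffer = xor_fold_once(buffers[-1], stored_buffer)
--     output.append(stored_buffer)
--
--     # each buffer is then xor_folded with the previous one.
--     for buffer in buffers:
--         stored_buffer = xor_fold_once(buffer, stored_buffer)
--         output.append(stored_buffer)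
--
--     return output
-- ===== SOURCE B (Python) =====
-- def _step(inp, buffer):
--     """One xor-fold step computed with big-integer arithmetic instead of per-byte ops."""
--     xb = bytes((a ^ b) & 255 for a, b in zip(inp, buffer))
--     L = len(xb)
--     if L == 0:
--         return []
--     n = int.from_bytes(xb, 'little')
--     M = 256 ** L
--     hi = (M - 1) // 255 * 128          # bit 7 of every byte
--     h = n & hi                         # the top bit of each byte
--     shifted = 2 * (n - h)              # per-byte shift left (no cross-byte carries)
--     carried = h * 256 % M + h // (M // 256)   # each top bit moved to the NEXT byte's top bit, wrapping
--     return list((shifted | carried).to_bytes(L, 'little'))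
--
-- def xor_fold_rot(buffers):
--     """Fold each buffer into the next with a xor-rotate-and-fold."""
--     output = []
--     stored = [0] * 20
--     for buffer in [buffers[-1]] + list(buffers):
--         stored = _step(buffer, stored)
--         output.append(stored)
--     return output
-- ===== Notes on version B (the rewrite author's own statement) =====
-- stated objective: alternative
-- what changed: Each fold step now packs the XOR of the two buffers into one big little-endian integer and performs the whole-buffer rotate with integer arithmetic (mask the top bit of every byte, double, move the top bits one byte up with wraparound, OR), replacing A's per-byte shift/leftmost-bit comprehension; the seed step is folded into a single loop over [buffers[-1]] + buffers.
import Mathlib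
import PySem

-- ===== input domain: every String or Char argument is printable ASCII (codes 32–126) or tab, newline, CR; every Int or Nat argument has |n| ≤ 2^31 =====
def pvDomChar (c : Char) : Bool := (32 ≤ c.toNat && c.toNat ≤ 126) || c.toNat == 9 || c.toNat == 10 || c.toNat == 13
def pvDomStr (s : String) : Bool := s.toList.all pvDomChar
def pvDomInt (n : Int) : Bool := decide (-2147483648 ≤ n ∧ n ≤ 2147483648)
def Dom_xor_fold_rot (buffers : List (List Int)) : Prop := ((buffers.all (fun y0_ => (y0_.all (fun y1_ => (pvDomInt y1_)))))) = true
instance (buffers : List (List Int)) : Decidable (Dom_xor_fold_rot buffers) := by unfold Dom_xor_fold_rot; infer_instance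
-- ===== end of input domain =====

set_option maxHeartbeats 1000000
set_option maxRecDepth 10000

-- B re-implements each fold step with big-integer arithmetic (one number per buffer) instead of
-- per-byte comprehensions; equivalence of the return values is proved for every non-empty input.

-- ===== PORT A =====
def shift_left (byte : Int) : Int := PySem.Int.band (byte <<< (1 : Nat)) 255

def leftmost_bit (byte : Int) : Int := PySem.Int.band byte 128

def xor_fold_once (input buffer : List Int) : List Int :=
  let output := (input.zip buffer).map (fun ab => PySem.Int.bxor ab.1 ab.2)
  (List.range output.length).map (fun (i : Nat) =>
    PySem.Int.bor (shift_left (PySem.List.pyGetD output ((i : Int)) 0))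
                  (leftmost_bit (PySem.List.pyGetD output ((i : Int) - 1) 0)))

def xor_fold_rot (buffers : List (List Int)) : List (List Int) :=
  let stored0 : List Int := List.replicate 20 0
  let stored1 := xor_fold_once (PySem.List.pyGetD buffers (-1) []) stored0
  (buffers.foldl (fun acc buf =>
      let s := xor_fold_once buf acc.2
      (acc.1 ++ [s], s)) ([stored1], stored1)).1

-- ===== PORT B =====
def fromBytesLE (bs : List Int) : Int := bs.foldr (fun b acc => b + 256 * acc) 0

def toBytesLE (L : Nat) (n : Int) : List Int :=
  match L with
  | 0 => []
  | L + 1 => PySem.Int.mod n 256 :: toBytesLE L (PySem.Int.floordiv n 256)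

def stepAlt (inp buffer : List Int) : List Int :=
  let xb := (inp.zip buffer).map (fun ab => PySem.Int.band (PySem.Int.bxor ab.1 ab.2) 255)
  let L := xb.length
  if L = 0 then []
  else
    let n := fromBytesLE xb
    let M : Int := 256 ^ L
    let hi := PySem.Int.floordiv (M - 1) 255 * 128
    let h := PySem.Int.band n hi
    let shifted := 2 * (n - h)
    let carried := PySem.Int.mod (h * 256) M + PySem.Int.floordiv h (PySem.Int.floordiv M 256)
    toBytesLE L (PySem.Int.bor shifted carried)

def xor_fold_rot_alt (buffers : List (List Int)) : List (List Int) :=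
  ((PySem.List.pyGetD buffers (-1) [] :: buffers).foldl (fun acc buf =>
      let s := stepAlt buf acc.2
      (acc.1 ++ [s], s)) (([] : List (List Int)), (List.replicate 20 0 : List Int))).1

-- ===== PRECONDITION & SPEC =====
-- Python A evaluates buffers[-1]: it raises IndexError exactly on the empty list.
def Pre_xor_fold_rot (buffers : List (List Int)) : Prop := buffers ≠ []
instance (buffers : List (List Int)) : Decidable (Pre_xor_fold_rot buffers) := by
  unfold Pre_xor_fold_rot; infer_instance

def pvWitness_xor_fold_rot : List (List Int) := [[1, 200], [3, 130, 7]]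

def Spec_xor_fold_rot (buffers : List (List Int)) (out : List (List Int)) : Prop :=
  out = xor_fold_rot_alt buffers
instance (buffers : List (List Int)) (out : List (List Int)) : Decidable (Spec_xor_fold_rot buffers out) := by
  unfold Spec_xor_fold_rot; infer_instance

-- ===== CLAIM (what is proved, stated in full; the proofs are below) =====
def Claim_equal_xor_fold_rot : Prop := ∀ (buffers : List (List Int)), Dom_xor_fold_rot buffers →
  Pre_xor_fold_rot buffers → Spec_xor_fold_rot buffers (xor_fold_rot buffers)

-- ===== LEMMAS AND PROOFS =====

-- little-endian value of a list of bytes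
def ofB (l : List Nat) : Nat := l.foldr (fun b a => b + 256 * a) 0

-- the byte a Python int contributes at the lowest position
def pvByte (o : Int) : Nat := (o % 256).toNat

theorem ofB_nil : ofB [] = 0 := rfl
theorem ofB_cons (x : Nat) (l : List Nat) : ofB (x :: l) = x + 256 * ofB l := rfl

theorem and128 (x : Nat) : x &&& 128 = x / 128 % 2 * 128 := by
  have h : (128 : Nat) = 2 ^ 7 := by norm_num
  rw [h, Nat.and_two_pow, Nat.toNat_testBit]

theorem and255 (x : Nat) : x &&& 255 = x % 256 := by
  have h : (255 : Nat) = 2 ^ 8 - 1 := by norm_num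
  have h2 : (256 : Nat) = 2 ^ 8 := by norm_num
  rw [h, h2, Nat.and_two_pow_sub_one_eq_mod]

theorem and128_mod (x : Nat) : x &&& 128 = x % 256 &&& 128 := by
  rw [and128, and128]; omega

theorem ofB_lt (l : List Nat) (h : ∀ x ∈ l, x < 256) : ofB l < 256 ^ l.length := by
  induction l with
  | nil => simp [ofB_nil]
  | cons x t ih =>
    have hx := h x (by simp)
    have ht := ih (fun y hy => h y (by simp [hy]))
    simp only [ofB_cons, List.length_cons, pow_succ]
    calc x + 256 * ofB t < 256 + 256 * ofB t := by omega
      _ = 256 * (ofB t + 1) := by ring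
      _ ≤ 256 * 256 ^ t.length := by
            have : ofB t + 1 ≤ 256 ^ t.length := ht
            exact Nat.mul_le_mul_left _ this
      _ = 256 ^ t.length * 256 := by ring

theorem byteAnd (x y a b : Nat) (hx : x < 256) (hy : y < 256) :
    (x + 256 * a) &&& (y + 256 * b) = (x &&& y) + 256 * (a &&& b) := by
  have hxy : x &&& y < 256 := Nat.lt_of_le_of_lt Nat.and_le_left hx
  apply Nat.eq_of_testBit_eq
  intro j
  have e : ∀ (u c : Nat), (u + 256 * c) = 2 ^ 8 * c + u := by intro u c; ring
  rw [e x a, e y b, e (x &&& y) (a &&& b)]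
  rw [Nat.testBit_land, Nat.testBit_two_pow_mul_add _ hx, Nat.testBit_two_pow_mul_add _ hy,
      Nat.testBit_two_pow_mul_add _ hxy]
  split_ifs <;> simp

theorem byteOr (x y a b : Nat) (hx : x < 256) (hy : y < 256) :
    (x + 256 * a) ||| (y + 256 * b) = (x ||| y) + 256 * (a ||| b) := by
  have hxy : x ||| y < 256 := by
    have h2 : (256 : Nat) = 2 ^ 8 := by norm_num
    rw [h2] at hx hy ⊢
    exact Nat.or_lt_two_pow hx hy
  apply Nat.eq_of_testBit_eq
  intro j
  have e : ∀ (u c : Nat), (u + 256 * c) = 2 ^ 8 * c + u := by intro u c; ring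
  rw [e x a, e y b, e (x ||| y) (a ||| b)]
  rw [Nat.testBit_lor, Nat.testBit_two_pow_mul_add _ hx, Nat.testBit_two_pow_mul_add _ hy,
      Nat.testBit_two_pow_mul_add _ hxy]
  split_ifs <;> simp

theorem ofB_and (l r : List Nat) (hlen : r.length = l.length)
    (hl : ∀ x ∈ l, x < 256) (hr : ∀ x ∈ r, x < 256) :
    ofB l &&& ofB r = ofB (List.zipWith (· &&& ·) l r) := by
  induction l generalizing r with
  | nil => have : r = [] := List.eq_nil_of_length_eq_zero (by simpa using hlen)
           simp [this, ofB_nil]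
  | cons x t ih =>
    cases r with
    | nil => simp at hlen
    | cons y s =>
      have hx := hl x (by simp)
      have hy := hr y (by simp)
      simp only [List.zipWith_cons_cons, ofB_cons]
      rw [byteAnd x y (ofB t) (ofB s) hx hy,
          ih s (by simpa using hlen) (fun z hz => hl z (by simp [hz])) (fun z hz => hr z (by simp [hz]))]

theorem ofB_or (l r : List Nat) (hlen : r.length = l.length)
    (hl : ∀ x ∈ l, x < 256) (hr : ∀ x ∈ r, x < 256) :
    ofB l ||| ofB r = ofB (List.zipWith (· ||| ·) l r) := by
  induction l generalizing r with
  | nil => have : r = [] := List.eq_nil_of_length_eq_zero (by simpa using hlen)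
           simp [this, ofB_nil]
  | cons x t ih =>
    cases r with
    | nil => simp at hlen
    | cons y s =>
      have hx := hl x (by simp)
      have hy := hr y (by simp)
      simp only [List.zipWith_cons_cons, ofB_cons]
      rw [byteOr x y (ofB t) (ofB s) hx hy,
          ih s (by simpa using hlen) (fun z hz => hl z (by simp [hz])) (fun z hz => hr z (by simp [hz]))]

theorem zipWith_and_replicate (l : List Nat) :
    List.zipWith (· &&& ·) l (List.replicate l.length 128) = l.map (· &&& 128) := by
  induction l with
  | nil => simp
  | cons x t ih => simp [List.replicate_succ, ih]

theorem geom255 (L : Nat) : 255 * ofB (List.replicate L 1) = 256 ^ L - 1 := by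
  induction L with
  | zero => simp [ofB_nil]
  | succ L ih =>
    have hp : 1 ≤ 256 ^ L := Nat.one_le_pow _ _ (by norm_num)
    simp only [List.replicate_succ, ofB_cons, pow_succ]
    omega

theorem rep128 (L : Nat) : ofB (List.replicate L 128) = 128 * ofB (List.replicate L 1) := by
  induction L with
  | zero => simp [ofB_nil]
  | succ L ih => simp only [List.replicate_succ, ofB_cons, ih]; ring

theorem hi_eq (L : Nat) : (256 ^ L - 1) / 255 * 128 = ofB (List.replicate L 128) := by
  rw [← geom255, Nat.mul_div_cancel_left _ (by norm_num), rep128]; ring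

theorem ofB_append (l r : List Nat) : ofB (l ++ r) = ofB l + 256 ^ l.length * ofB r := by
  induction l with
  | nil => simp [ofB_nil]
  | cons x t ih => simp only [List.cons_append, ofB_cons, ih, List.length_cons, pow_succ]; ring

theorem ofB_split (l : List Nat) (k : Nat) (h : ∀ x ∈ l, x < 256) :
    ofB l % 256 ^ k = ofB (l.take k) ∧ ofB l / 256 ^ k = ofB (l.drop k) := by
  by_cases hk : k ≤ l.length
  · have hsplit : l = l.take k ++ l.drop k := (List.take_append_drop k l).symm
    have hlen : (l.take k).length = k := by simp [hk]
    have hlt : ofB (l.take k) < 256 ^ k := by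
      have := ofB_lt (l.take k) (fun x hx => h x (List.mem_of_mem_take hx))
      rwa [hlen] at this
    constructor
    · conv_lhs => rw [hsplit]
      rw [ofB_append, hlen, Nat.add_mul_mod_self_left, Nat.mod_eq_of_lt hlt]
    · conv_lhs => rw [hsplit]
      rw [ofB_append, hlen, Nat.add_mul_div_left _ _ (Nat.pow_pos (show 0 < 256 by norm_num)),
          Nat.div_eq_of_lt hlt]
      omega
  · have h1 : l.take k = l := List.take_of_length_le (by omega)
    have h2 : l.drop k = [] := List.drop_eq_nil_of_le (by omega)
    have hlt : ofB l < 256 ^ k := by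
      have := ofB_lt l h
      exact this.trans_le (Nat.pow_le_pow_right (by norm_num) (by omega))
    rw [h1, h2]
    exact ⟨Nat.mod_eq_of_lt hlt, by simp [ofB_nil, Nat.div_eq_of_lt hlt]⟩

theorem ofB_map_and_le (l : List Nat) : ofB (l.map (· &&& 128)) ≤ ofB l := by
  induction l with
  | nil => simp [ofB_nil]
  | cons x t ih =>
    simp only [List.map_cons, ofB_cons]
    have := @Nat.and_le_left x 128
    omega

theorem ofB_sub_map (l : List Nat) :
    ofB l - ofB (l.map (· &&& 128)) = ofB (l.map (fun x => x - (x &&& 128))) := by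
  induction l with
  | nil => simp [ofB_nil]
  | cons x t ih =>
    simp only [List.map_cons, ofB_cons]
    have h1 := ofB_map_and_le t
    have h2 : x &&& 128 ≤ x := Nat.and_le_left
    omega

theorem ofB_two_mul (l : List Nat) : 2 * ofB l = ofB (l.map (fun x => 2 * x)) := by
  induction l with
  | nil => simp [ofB_nil]
  | cons x t ih => simp only [List.map_cons, ofB_cons]; omega

theorem drop_pred (l : List Nat) (h : l ≠ []) : l.drop (l.length - 1) = [l.getLastD 0] := by
  induction l with
  | nil => simp at h
  | cons x t ih =>
    cases t with
    | nil => simp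
    | cons y s =>
      have hne : (y :: s : List Nat) ≠ [] := by simp
      have : (x :: y :: s).length - 1 = ((y :: s).length - 1) + 1 := by simp
      rw [this, List.drop_succ_cons, ih hne]
      simp [List.getLastD]

theorem toBytesLE_ofB (l : List Nat) (h : ∀ x ∈ l, x < 256) :
    toBytesLE l.length ((ofB l : Nat) : Int) = l.map (Nat.cast : Nat → Int) := by
  induction l with
  | nil => rfl
  | cons x t ih =>
    have hx := h x (by simp)
    show PySem.Int.mod _ 256 :: toBytesLE _ _ = _ :: _
    congr 1
    · rw [show (256 : Int) = ((256 : Nat) : Int) from rfl, PySem.Int.mod_natCast, ofB_cons,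
          show (x + 256 * ofB t) % 256 = x by omega]
    · rw [show (256 : Int) = ((256 : Nat) : Int) from rfl, PySem.Int.floordiv_natCast, ofB_cons,
          show (x + 256 * ofB t) / 256 = ofB t by omega]
      exact ih (fun y hy => h y (by simp [hy]))

theorem fromB_cast (l : List Nat) : fromBytesLE (l.map (Nat.cast : Nat → Int)) = ((ofB l : Nat) : Int) := by
  induction l with
  | nil => rfl
  | cons x t ih =>
    have step : fromBytesLE ((x :: t).map (Nat.cast : Nat → Int))
        = (x : Int) + 256 * fromBytesLE (t.map (Nat.cast : Nat → Int)) := rfl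
    rw [step, ih, ofB_cons]
    push_cast
    ring

-- Int-level byte lemmas (A's per-byte ops in terms of pvByte)
theorem pvByte_lt (o : Int) : pvByte o < 256 := by
  unfold pvByte
  omega

theorem band_255 (o : Int) : PySem.Int.band o 255 = ((pvByte o : Nat) : Int) := by
  have h255 : ((255 : Int)).toNat = 255 := rfl
  by_cases h1 : 0 ≤ o
  · simp only [PySem.Int.band, if_pos h1, if_pos (show (0:Int) ≤ 255 by norm_num), h255]
    rw [and255]
    unfold pvByte
    omega
  · simp only [PySem.Int.band, if_neg h1, if_pos (show (0:Int) ≤ 255 by norm_num), h255]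
    rw [Nat.land_comm, and255]
    unfold pvByte
    omega

theorem band_128 (o : Int) : PySem.Int.band o 128 = ((pvByte o &&& 128 : Nat) : Int) := by
  have h128 : ((128 : Int)).toNat = 128 := rfl
  by_cases h1 : 0 ≤ o
  · simp only [PySem.Int.band, if_pos h1, if_pos (show (0:Int) ≤ 128 by norm_num), h128]
    rw [and128_mod o.toNat]
    unfold pvByte
    rw [show o.toNat % 256 = (o % 256).toNat by omega]
  · simp only [PySem.Int.band, if_neg h1, if_pos (show (0:Int) ≤ 128 by norm_num), h128]
    rw [Nat.land_comm, and128_mod ((-o - 1).toNat)]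
    unfold pvByte
    have hb : (o % 256).toNat = 255 - ((-o - 1).toNat % 256) := by omega
    rw [hb, and128 ((-o - 1).toNat % 256), and128 (255 - (-o - 1).toNat % 256)]
    omega

theorem band_shift_255 (o : Int) :
    PySem.Int.band (o <<< (1 : Nat)) 255 = ((2 * pvByte o % 256 : Nat) : Int) := by
  rw [band_255]
  unfold pvByte
  rw [Int.shiftLeft_eq, show ((2:Int) ^ (1:Nat)) = 2 by norm_num]
  have : ((o * 2) % 256).toNat = 2 * (o % 256).toNat % 256 := by omega
  exact congrArg (fun n : Nat => (n : Int)) this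

-- bf1: doubling the 7 low bits is doubling mod 256
theorem bf1 (x : Nat) (hx : x < 256) : 2 * (x - (x &&& 128)) = 2 * x % 256 := by
  rw [and128]; omega

-- ===== the central step lemma =====
theorem getLastD_eq (l : List Nat) (h : l ≠ []) (hlt : l.length - 1 < l.length) :
    l.getLastD 0 = l[l.length - 1] := by
  have hd := drop_pred l h
  have h0 : l[l.length - 1 + 0]? = some (l.getLastD 0) := by
    rw [← List.getElem?_drop, hd]; rfl
  rw [Nat.add_zero, List.getElem?_eq_getElem hlt] at h0
  exact (Option.some.inj h0).symm

theorem final_list (os : List Int) (hosne : os ≠ []) :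
    List.map (Nat.cast : Nat → Int)
      (List.zipWith (· ||| ·)
        (List.map (fun x => 2 * x) (List.map (fun x => x - (x &&& 128)) (List.map pvByte os)))
        ((List.map (fun x => x &&& 128) (List.map pvByte os)).getLastD 0 ::
         (List.map (fun x => x &&& 128) (List.map pvByte os)).dropLast))
    = (List.range os.length).map (fun (i : Nat) =>
        PySem.Int.bor (shift_left (PySem.List.pyGetD os ((i : Int)) 0))
                      (leftmost_bit (PySem.List.pyGetD os ((i : Int) - 1) 0))) := by
  have hL : 1 ≤ os.length := List.length_pos_iff.mpr hosne
  have hmapne : List.map (fun x => x &&& 128) (List.map pvByte os) ≠ [] := by simpa using hosne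
  apply List.ext_getElem
  · simp only [List.length_map, List.length_zipWith, List.length_cons, List.length_dropLast,
      List.length_range]
    omega
  intro i hi1 hi2
  have hiL : i < os.length := by
    simp only [List.length_map, List.length_zipWith, List.length_cons, List.length_dropLast] at hi1
    omega
  simp only [List.getElem_map, List.getElem_zipWith, List.getElem_range, shift_left, leftmost_bit]
  rw [PySem.List.pyGetD_natCast, List.getD_eq_getElem _ _ hiL, band_shift_255]
  cases i with
  | zero =>
    simp only [List.getElem_cons_zero]
    simp only [getLastD_eq _ hmapne (by simp only [List.length_map]; omega)]
    simp only [List.length_map, List.getElem_map]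
    rw [show ((0 : Nat) : Int) - 1 = (-1 : Int) by norm_num, PySem.List.pyGetD_neg_one os 0 hosne,
        List.getLast_eq_getElem hosne, band_128, PySem.Int.bor_natCast]
    congr 1
    rw [bf1 _ (pvByte_lt _)]
  | succ j =>
    rw [List.getElem_cons_succ, List.getElem_dropLast]
    simp only [List.getElem_map]
    rw [show (((j + 1 : Nat)) : Int) - 1 = ((j : Nat) : Int) by push_cast; ring,
        PySem.List.pyGetD_natCast, List.getD_eq_getElem _ _ (by omega : j < os.length),
        band_128, PySem.Int.bor_natCast]
    congr 1
    rw [bf1 _ (pvByte_lt _)]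

theorem step_eq (inp buffer : List Int) : stepAlt inp buffer = xor_fold_once inp buffer := by
  have hxb : (inp.zip buffer).map (fun ab => PySem.Int.band (PySem.Int.bxor ab.1 ab.2) 255)
      = (((inp.zip buffer).map (fun ab => PySem.Int.bxor ab.1 ab.2)).map pvByte).map
          (Nat.cast : Nat → Int) := by
    rw [List.map_map, List.map_map]
    exact List.map_congr_left (fun ab _ => band_255 _)
  simp only [stepAlt, xor_fold_once, hxb]
  set os : List Int := (inp.zip buffer).map (fun ab => PySem.Int.bxor ab.1 ab.2) with hos
  set xs : List Nat := os.map pvByte with hxs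
  simp only [List.length_map]
  by_cases hL0 : os.length = 0
  · have hnil : os = [] := List.eq_nil_of_length_eq_zero hL0
    have hxnil : xs = [] := by rw [hxs, hnil]; rfl
    rw [if_pos (by rw [hxnil]; rfl), hnil]
    simp
  · have hlenxs : xs.length = os.length := by rw [hxs, List.length_map]
    rw [if_neg (by omega)]
    set L := xs.length with hLdef
    have hL : 1 ≤ L := by omega
    have hosne : os ≠ [] := fun h => hL0 (by rw [h]; rfl)
    have hxsne : xs ≠ [] := by
      intro h
      have h0 : xs.length = 0 := by rw [h]; rfl
      omega
    -- byte lists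
    set hs : List Nat := xs.map (· &&& 128) with hhs
    set ds : List Nat := xs.map (fun x => x - (x &&& 128)) with hds
    set ss : List Nat := ds.map (fun x => 2 * x) with hss
    have hhsne : hs ≠ [] := by rw [hhs]; simpa using hxsne
    have hlenhs : hs.length = L := by rw [hhs, List.length_map]
    set cs : List Nat := hs.getLastD 0 :: hs.dropLast with hcs
    set rs : List Nat := List.zipWith (· ||| ·) ss cs with hrs
    -- bounds
    have hxs256 : ∀ x ∈ xs, x < 256 := by
      intro x hx
      obtain ⟨o, _, rfl⟩ := List.mem_map.mp hx
      exact pvByte_lt o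
    have hhs256 : ∀ x ∈ hs, x < 256 := by
      intro x hx
      obtain ⟨y, _, rfl⟩ := List.mem_map.mp hx
      exact Nat.lt_of_le_of_lt Nat.and_le_right (by norm_num)
    have hcs256 : ∀ x ∈ cs, x < 256 := by
      intro x hx
      rcases List.mem_cons.mp hx with h | h
      · subst h
        rw [getLastD_eq hs hhsne (by omega)]
        exact hhs256 _ (List.getElem_mem _)
      · exact hhs256 _ (List.dropLast_subset _ h)
    have hss256 : ∀ x ∈ ss, x < 256 := by
      intro x hx
      rw [hss, hds, List.map_map] at hx
      obtain ⟨y, hy, rfl⟩ := List.mem_map.mp hx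
      have := hxs256 y hy
      simp only [Function.comp]
      rw [bf1 y this]
      exact Nat.mod_lt _ (by norm_num)
    have hrs256 : ∀ x ∈ rs, x < 256 := by
      intro x hx
      obtain ⟨i, hi, rfl⟩ := List.mem_iff_getElem.mp hx
      have hi' : i < (List.zipWith (· ||| ·) ss cs).length := by rw [← hrs]; exact hi
      have : rs[i]'hi = (ss[i]'(by rw [List.length_zipWith] at hi'; omega)) |||
          (cs[i]'(by rw [List.length_zipWith] at hi'; omega)) := List.getElem_zipWith
      rw [this]
      have h2 : (256 : Nat) = 2 ^ 8 := by norm_num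
      rw [h2]
      exact Nat.or_lt_two_pow (h2 ▸ hss256 _ (List.getElem_mem _)) (h2 ▸ hcs256 _ (List.getElem_mem _))
    -- lengths
    have hlds : ds.length = L := by rw [hds, List.length_map]
    have hlss : ss.length = L := by rw [hss, List.length_map, hlds]
    have hlcs : cs.length = L := by
      rw [hcs, List.length_cons, List.length_dropLast, hlenhs]; omega
    have hlrs : rs.length = L := by rw [hrs, List.length_zipWith, hlss, hlcs]; omega
    -- the integer pipeline
    have e1 : fromBytesLE (xs.map (Nat.cast : Nat → Int)) = ((ofB xs : Nat) : Int) := fromB_cast xs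
    have eM : ((256 : Int)) ^ L = (((256 ^ L : Nat)) : Int) := by push_cast; ring
    have hMpos : 1 ≤ 256 ^ L := Nat.one_le_pow _ _ (by norm_num)
    have e2 : PySem.Int.floordiv ((256 : Int) ^ L - 1) 255 * 128
        = ((ofB (List.replicate L 128) : Nat) : Int) := by
      rw [eM, show (((256 ^ L : Nat)) : Int) - 1 = (((256 ^ L - 1 : Nat)) : Int) by omega,
          show (255 : Int) = ((255 : Nat) : Int) from rfl, PySem.Int.floordiv_natCast]
      rw [show ((((256 ^ L - 1) / 255 : Nat)) : Int) * 128 = (((256 ^ L - 1) / 255 * 128 : Nat) : Int) by push_cast; ring]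
      rw [hi_eq]
    have e3 : PySem.Int.band ((ofB xs : Nat) : Int) ((ofB (List.replicate L 128) : Nat) : Int)
        = ((ofB hs : Nat) : Int) := by
      rw [PySem.Int.band_natCast]
      congr 1
      rw [ofB_and xs (List.replicate L 128) (by simpa using hLdef) hxs256 (by intro x hx; simp at hx; omega)]
      rw [hLdef, zipWith_and_replicate]
    have hofle : ofB hs ≤ ofB xs := by rw [hhs]; exact ofB_map_and_le xs
    have e4 : 2 * (((ofB xs : Nat) : Int) - ((ofB hs : Nat) : Int)) = ((ofB ss : Nat) : Int) := by
      rw [show ((ofB xs : Nat) : Int) - ((ofB hs : Nat) : Int) = ((ofB xs - ofB hs : Nat) : Int) by omega]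
      rw [hhs, ofB_sub_map xs, ← hds]
      rw [show (2 : Int) * ((ofB ds : Nat) : Int) = ((2 * ofB ds : Nat) : Int) by push_cast; ring]
      rw [ofB_two_mul ds]
    have e5 : PySem.Int.mod (((ofB hs : Nat) : Int) * 256) ((256 : Int) ^ L)
          + PySem.Int.floordiv ((ofB hs : Nat) : Int) (PySem.Int.floordiv ((256 : Int) ^ L) 256)
        = ((ofB cs : Nat) : Int) := by
      have hfd : PySem.Int.floordiv ((256 : Int) ^ L) 256 = (((256 ^ (L - 1) : Nat)) : Int) := by
        rw [eM, show (256 : Int) = ((256 : Nat) : Int) from rfl, PySem.Int.floordiv_natCast]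
        congr 1
        rw [show 256 ^ L = 256 ^ (L - 1) * 256 by rw [← pow_succ]; congr 1; omega]
        exact Nat.mul_div_cancel _ (by norm_num)
      rw [hfd, eM,
          show ((ofB hs : Nat) : Int) * 256 = ((ofB hs * 256 : Nat) : Int) by push_cast; ring,
          PySem.Int.mod_natCast, PySem.Int.floordiv_natCast]
      have h0hs : ∀ x ∈ (0 :: hs : List Nat), x < 256 := by
        intro x hx
        rcases List.mem_cons.mp hx with h | h
        · omega
        · exact hhs256 x h
      have hsplit1 := (ofB_split (0 :: hs) L h0hs).1
      have hsplit2 := (ofB_split hs (L - 1) hhs256).2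
      have htake : (0 :: hs : List Nat).take L = 0 :: hs.dropLast := by
        obtain ⟨L', hL'⟩ : ∃ L', L = L' + 1 := ⟨L - 1, by omega⟩
        rw [List.dropLast_eq_take, hlenhs, hL', List.take_succ_cons]
        simp
      have hdrop : hs.drop (L - 1) = [hs.getLastD 0] := by
        rw [← hlenhs]
        exact drop_pred hs hhsne
      have hmul : ofB hs * 256 = ofB (0 :: hs) := by rw [ofB_cons]; ring
      rw [hmul, hsplit1, hsplit2, htake, hdrop, hcs]
      simp only [ofB_cons, ofB_nil]
      push_cast
      ring
    have e6 : PySem.Int.bor ((ofB ss : Nat) : Int) ((ofB cs : Nat) : Int) = ((ofB rs : Nat) : Int) := by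
      rw [PySem.Int.bor_natCast]
      congr 1
      rw [ofB_or ss cs (by omega) hss256 hcs256, hrs]
    rw [e1, e2, e3, e4, e5, e6, ← hlrs, toBytesLE_ofB rs hrs256]
    exact final_list os hosne

theorem fold_eq (buffers : List (List Int)) : xor_fold_rot buffers = xor_fold_rot_alt buffers := by
  have hfun : stepAlt = xor_fold_once := funext fun a => funext fun b => step_eq a b
  unfold xor_fold_rot xor_fold_rot_alt
  rw [hfun]
  simp [List.foldl_cons]

-- ===== VERDICT (by name: the statement is the Claim_ definition above) =====
theorem xor_fold_rot_spec : Claim_equal_xor_fold_rot := by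
  intro buffers _ _
  unfold Spec_xor_fold_rot
  exact fold_eq buffers
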